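-- pv_equiv track=rewrite | github.com/Naveen-Kadri/phASER | gtf.py | count_var
-- ===== SOURCE A (Python) =====
-- def count_var (start, end, phase,varlist):
--     if start > end:
--         start, end = end,start
--     nvar=dict ()
--     nbases=dict ()
--     tracker=int (phase) -1
--     for pos in range (start, end+1):
--         tracker+=1
--         triplet_pos=tracker%3
--         nbases [triplet_pos]= nbases.get(triplet_pos,0)+1
--         if pos in varlist:
--             nvar [triplet_pos]= nvar.get(triplet_pos,0)+1
--     tr=[]
--     for k in range (3):
--         # 0 is for 3rd pos of the triplet
--         tr.append (str  (nbases.get(k,0)   )   )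
--         tr.append (str   (nvar.get (k,0))   )
--     return ("\t".join (tr))
-- ===== SOURCE B (Python) =====
-- def count_var(start, end, phase, varlist):
--     if start > end:
--         start, end = end, start
--     n = end - start + 1
--     uniq = set(varlist)
--     tr = []
--     for k in range(3):
--         tr.append(str((n - (k - phase) % 3 + 2) // 3))
--         tr.append(str(sum(1 for p in uniq
--                           if start <= p <= end and (phase + p - start) % 3 == k)))
--     return "\t".join(tr)
-- ===== Notes on version B (the rewrite author's own statement) =====
-- stated objective: faster
-- what changed: B replaces the per-base loop over the whole range with a closed-form residue formula for the base counts and a single pass over the distinct varlist positions for the variant counts.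
import Mathlib
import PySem

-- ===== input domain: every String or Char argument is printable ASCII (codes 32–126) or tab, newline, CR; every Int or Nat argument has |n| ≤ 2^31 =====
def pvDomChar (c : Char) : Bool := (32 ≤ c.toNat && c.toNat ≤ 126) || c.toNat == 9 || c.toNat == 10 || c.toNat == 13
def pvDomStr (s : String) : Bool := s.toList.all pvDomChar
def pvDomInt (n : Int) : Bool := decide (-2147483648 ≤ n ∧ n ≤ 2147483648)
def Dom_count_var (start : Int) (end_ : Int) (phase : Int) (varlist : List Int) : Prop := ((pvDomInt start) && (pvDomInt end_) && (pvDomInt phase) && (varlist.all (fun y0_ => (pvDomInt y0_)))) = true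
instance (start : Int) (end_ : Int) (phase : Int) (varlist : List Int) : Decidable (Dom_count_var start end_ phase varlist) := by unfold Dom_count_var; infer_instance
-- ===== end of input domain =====

-- B replaces A's per-base scan of the whole range (with a varlist membership test
-- per base) by a closed-form residue count for nbases and a single pass over the
-- distinct varlist positions for nvar; objective: faster.


-- ===== PORT A =====
-- literal transliteration of A: swap, then one pass over range(start, end+1)
-- carrying (nvar, nbases, tracker), then the formatting loop over range(3).
def count_var (start : Int) (end_ : Int) (phase : Int) (varlist : List Int) : String :=
  let se := if start > end_ then (end_, start) else (start, end_)
  let st :=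
    (PySem.List.pyRange se.1 (se.2 + 1) 1).foldl
      (fun (st : PySem.Dict Int Int × PySem.Dict Int Int × Int) pos =>
        let tracker := st.2.2 + 1
        let triplet_pos := PySem.Int.mod tracker 3
        let nbases := st.2.1.insert triplet_pos (st.2.1.getD triplet_pos 0 + 1)
        let nvar := if varlist.contains pos then
            st.1.insert triplet_pos (st.1.getD triplet_pos 0 + 1)
          else st.1
        (nvar, nbases, tracker))
      (PySem.Dict.empty, PySem.Dict.empty, phase - 1)
  let tr :=
    (PySem.List.pyRange 0 3 1).foldl
      (fun acc k =>
        (acc ++ [PySem.Int.toStr (st.2.1.getD k 0)]) ++ [PySem.Int.toStr (st.1.getD k 0)])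
      []
  PySem.Str.join "\t" tr

-- ===== PORT B =====
-- literal transliteration of B (Source B): closed-form base count per codon position,
-- countP over the distinct varlist elements (set(varlist)) for the variant count.
def count_var_alt (start : Int) (end_ : Int) (phase : Int) (varlist : List Int) : String :=
  let s := if start > end_ then end_ else start
  let e := if start > end_ then start else end_
  let n := e - s + 1
  let uniq := PySem.Set.ofList varlist
  let tr :=
    (PySem.List.pyRange 0 3 1).foldl
      (fun acc k =>
        (acc ++ [PySem.Int.toStr (PySem.Int.floordiv (n - PySem.Int.mod (k - phase) 3 + 2) 3)]) ++
          [PySem.Int.toStr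
            ((uniq.countP (fun p =>
                s ≤ p && p ≤ e && (PySem.Int.mod (phase + p - s) 3 == k)) : Int))])
      []
  PySem.Str.join "\t" tr

-- ===== PRECONDITION & SPEC =====
def Spec_count_var (start : Int) (end_ : Int) (phase : Int) (varlist : List Int) (out : String) : Prop := out = count_var_alt start end_ phase varlist
instance (start : Int) (end_ : Int) (phase : Int) (varlist : List Int) (out : String) : Decidable (Spec_count_var start end_ phase varlist out) := by unfold Spec_count_var; infer_instance

-- ===== CLAIM (what is proved, stated in full; the proofs are below) =====
def Claim_equal_count_var : Prop := ∀ (start : Int) (end_ : Int) (phase : Int) (varlist : List Int), Dom_count_var start end_ phase varlist → Spec_count_var start end_ phase varlist (count_var start end_ phase varlist)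

-- ===== LEMMAS AND PROOFS =====

-- A's main loop as a standalone function of the position list (for the invariant).
def cvLoop (phase : Int) (varlist : List Int) (ps : List Int) :
    PySem.Dict Int Int × PySem.Dict Int Int × Int :=
  ps.foldl
    (fun (st : PySem.Dict Int Int × PySem.Dict Int Int × Int) pos =>
      let tracker := st.2.2 + 1
      let triplet_pos := PySem.Int.mod tracker 3
      let nbases := st.2.1.insert triplet_pos (st.2.1.getD triplet_pos 0 + 1)
      let nvar := if varlist.contains pos then
          st.1.insert triplet_pos (st.1.getD triplet_pos 0 + 1)
        else st.1
      (nvar, nbases, tracker))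
    (PySem.Dict.empty, PySem.Dict.empty, phase - 1)

lemma cvLoop_step (phase x : Int) (varlist l : List Int) :
    cvLoop phase varlist (l ++ [x]) =
      ((if varlist.contains x then
          (cvLoop phase varlist l).1.insert (PySem.Int.mod ((cvLoop phase varlist l).2.2 + 1) 3)
            ((cvLoop phase varlist l).1.getD (PySem.Int.mod ((cvLoop phase varlist l).2.2 + 1) 3) 0 + 1)
        else (cvLoop phase varlist l).1),
       (cvLoop phase varlist l).2.1.insert (PySem.Int.mod ((cvLoop phase varlist l).2.2 + 1) 3)
         ((cvLoop phase varlist l).2.1.getD (PySem.Int.mod ((cvLoop phase varlist l).2.2 + 1) 3) 0 + 1),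
       (cvLoop phase varlist l).2.2 + 1) := by
  unfold cvLoop
  rw [List.foldl_append]
  rfl

-- loop invariant: tracker value and per-key contents of the two dicts after the scan
lemma cvLoop_inv (phase s : Int) (varlist : List Int) (n : Nat) :
    (cvLoop phase varlist (PySem.List.pyRange s (s + n) 1)).2.2 = phase - 1 + n ∧
    ∀ k : Int,
      (cvLoop phase varlist (PySem.List.pyRange s (s + n) 1)).2.1.getD k 0 =
        ((List.range n).countP (fun t : Nat => PySem.Int.mod (phase + (t : Int)) 3 == k) : Int) ∧
      (cvLoop phase varlist (PySem.List.pyRange s (s + n) 1)).1.getD k 0 =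
        ((List.range n).countP
          (fun t : Nat => varlist.contains (s + (t : Int)) &&
            (PySem.Int.mod (phase + (t : Int)) 3 == k)) : Int) := by
  induction n with
  | zero =>
    simp [cvLoop, PySem.List.pyRange_one_eq_nil (le_refl s)]
  | succ n ih =>
    have hcast : s + ((n + 1 : Nat) : Int) = (s + (n : Nat)) + 1 := by push_cast; ring
    rw [hcast, PySem.List.pyRange_one_succ_right (by omega : s ≤ s + (n : Nat)), cvLoop_step]
    obtain ⟨ht, hk⟩ := ih
    rw [ht]
    have harith : phase - 1 + (n : Int) + 1 = phase + n := by ring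
    rw [harith]
    dsimp only
    refine ⟨by push_cast; ring, ?_⟩
    intro k
    obtain ⟨hb, hv⟩ := hk k
    rw [List.range_succ, List.countP_append, List.countP_append]
    simp only [List.countP_cons, List.countP_nil]
    by_cases hkk : k = PySem.Int.mod (phase + (n : Int)) 3
    · subst hkk
      rw [PySem.Dict.getD_insert, if_pos rfl, hb]
      simp only [beq_self_eq_true, if_pos, Nat.zero_add]
      constructor
      · push_cast; ring
      · by_cases hc : varlist.contains (s + (n : Int))
        · rw [if_pos hc, PySem.Dict.getD_insert, if_pos rfl, hv]
          simp only [hc, Bool.true_and, if_pos]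
          push_cast; ring
        · rw [if_neg hc, hv]
          simp only [hc, Bool.false_and, if_neg, Bool.false_eq_true, not_false_iff]
          push_cast; ring
    · have hne : ¬ (PySem.Int.mod (phase + (n : Int)) 3 == k) = true := by
        simp only [beq_iff_eq]
        exact fun h => hkk h.symm
      rw [PySem.Dict.getD_insert, if_neg hkk, hb]
      simp only [hne, Bool.and_false, if_neg, Bool.false_eq_true, not_false_iff]
      constructor
      · push_cast; ring
      · by_cases hc : varlist.contains (s + (n : Int))
        · rw [if_pos hc, PySem.Dict.getD_insert, if_neg hkk, hv]
          push_cast; ring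
        · rw [if_neg hc, hv]
          push_cast; ring

-- B's closed form counts exactly the residue-k offsets of [0, n)
lemma count_residue_closed (phase k : Int) (hk0 : 0 ≤ k) (hk3 : k < 3) (n : Nat) :
    ((List.range n).countP (fun t : Nat => PySem.Int.mod (phase + (t : Int)) 3 == k) : Int) =
      PySem.Int.floordiv ((n : Int) - PySem.Int.mod (k - phase) 3 + 2) 3 := by
  simp only [PySem.Int.mod_eq_emod_of_pos (by norm_num : (0:Int) < 3),
    PySem.Int.floordiv_eq_ediv_of_pos (by norm_num : (0:Int) < 3)]
  induction n with
  | zero =>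
    simp only [List.range_zero, List.countP_nil, Nat.cast_zero]
    omega
  | succ n ih =>
    rw [List.range_succ, List.countP_append]
    simp only [List.countP_cons, List.countP_nil]
    by_cases h : (phase + (n : Int)) % 3 = k
    · simp only [h, beq_self_eq_true, if_pos]
      push_cast
      omega
    · have : ¬ ((phase + (n : Int)) % 3 == k) = true := by
        simpa using h
      simp only [this, if_neg, Bool.false_eq_true, not_false_iff]
      push_cast
      omega

-- the variant count over the base range equals B's count over the distinct varlist elements
lemma count_var_set (s e phase k : Int) (varlist : List Int)
    (n : Nat) (hn : (n : Int) = e + 1 - s) :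
    ((List.range n).countP
        (fun t : Nat => varlist.contains (s + (t : Int)) &&
          (PySem.Int.mod (phase + (t : Int)) 3 == k)) : Int) =
      ((PySem.Set.ofList varlist).countP
        (fun p => s ≤ p && p ≤ e && (PySem.Int.mod (phase + p - s) 3 == k)) : Int) := by
  have key : (List.range n).countP
        (fun t : Nat => varlist.contains (s + (t : Int)) &&
          (PySem.Int.mod (phase + (t : Int)) 3 == k)) =
      (PySem.Set.ofList varlist).countP
        (fun p => s ≤ p && p ≤ e && (PySem.Int.mod (phase + p - s) 3 == k)) := by
    rw [List.countP_eq_length_filter, List.countP_eq_length_filter]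
    -- map the left filter through t ↦ s + t, then compare as nodup lists with equal membership
    have hmap : ((List.range n).filter
          (fun t : Nat => varlist.contains (s + (t : Int)) &&
            (PySem.Int.mod (phase + (t : Int)) 3 == k))).length =
        (((List.range n).map (fun t : Nat => s + (t : Int))).filter
          (fun p => varlist.contains p && (PySem.Int.mod (phase + p - s) 3 == k))).length := by
      rw [List.filter_map, List.length_map]
      congr 1
      apply List.filter_congr
      intro t _
      simp only [Function.comp_apply]
      have : phase + (s + (t : Int)) - s = phase + (t : Int) := by ring
      rw [this]
    rw [hmap]
    apply List.Perm.length_eq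
    apply (List.perm_ext_iff_of_nodup ?_ ?_).mpr
    · intro p
      simp only [List.mem_filter, List.mem_map, List.mem_range, PySem.Set.mem_ofList,
        Bool.and_eq_true, decide_eq_true_eq, List.contains_iff_mem]
      constructor
      · rintro ⟨⟨t, ht, rfl⟩, hmem, hres⟩
        refine ⟨hmem, ⟨?_, ?_⟩, hres⟩ <;> omega
      · rintro ⟨hmem, ⟨h1, h2⟩, hres⟩
        refine ⟨⟨(p - s).toNat, by omega, by omega⟩, hmem, hres⟩
    · have hinj : Function.Injective (fun t : Nat => s + (t : Int)) := by
        intro a b hab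
        simp only at hab
        omega
      exact List.Nodup.filter _ (List.nodup_range.map hinj)
    · exact List.Nodup.filter _ (PySem.Set.nodup_ofList varlist)
  rw [key]

-- count_var's main fold IS cvLoop (same lambda, same init)
lemma cvLoop_eq_loop (start end_ phase : Int) (varlist : List Int) :
    count_var start end_ phase varlist =
      (let se := if start > end_ then (end_, start) else (start, end_)
       let st := cvLoop phase varlist (PySem.List.pyRange se.1 (se.2 + 1) 1)
       PySem.Str.join "\t"
        ((PySem.List.pyRange 0 3 1).foldl
          (fun acc k =>
            (acc ++ [PySem.Int.toStr (st.2.1.getD k 0)]) ++ [PySem.Int.toStr (st.1.getD k 0)])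
          [])) := rfl

lemma core_eq (s e phase : Int) (varlist : List Int) (h : s ≤ e) :
    count_var s e phase varlist = count_var_alt s e phase varlist := by
  have hns : ¬ s > e := not_lt.2 h
  have hn0 : (0 : Int) ≤ e + 1 - s := by omega
  set n : Nat := (e + 1 - s).toNat with hn
  have hne : e + 1 = s + (n : Int) := by omega
  have hnc : (n : Int) = e - s + 1 := by omega
  obtain ⟨ht, hk⟩ := cvLoop_inv phase s varlist n
  rw [cvLoop_eq_loop]
  simp only [if_neg hns]
  unfold count_var_alt
  simp only [if_neg hns]
  rw [hne]
  have h3 : PySem.List.pyRange 0 3 1 = [0, 1, 2] := by decide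
  rw [h3]
  simp only [List.foldl_cons, List.foldl_nil, List.nil_append]
  congr 1
  rw [(hk 0).1, (hk 0).2, (hk 1).1, (hk 1).2, (hk 2).1, (hk 2).2,
    count_residue_closed phase 0 (by norm_num) (by norm_num) n,
    count_residue_closed phase 1 (by norm_num) (by norm_num) n,
    count_residue_closed phase 2 (by norm_num) (by norm_num) n,
    count_var_set s e phase 0 varlist n (by omega),
    count_var_set s e phase 1 varlist n (by omega),
    count_var_set s e phase 2 varlist n (by omega),
    hnc]

-- ===== VERDICT (by name: the statement is the Claim_ definition above) =====
theorem count_var_spec : Claim_equal_count_var := by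
  intro start end_ phase varlist _
  unfold Spec_count_var
  by_cases h : start > end_
  · have hA : count_var start end_ phase varlist = count_var end_ start phase varlist := by
      simp [count_var, h, not_lt.2 (le_of_lt h)]
    have hB : count_var_alt start end_ phase varlist = count_var_alt end_ start phase varlist := by
      simp [count_var_alt, h, not_lt.2 (le_of_lt h)]
    rw [hA, hB, core_eq _ _ _ _ (le_of_lt h)]
  · exact core_eq _ _ _ _ (not_lt.1 h)
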